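-- pv_equiv track=rewrite | github.com/yujinrobot/yujin_tools | src/catkin_make/builder.py | extract_cmake_and_make_arguments
-- ===== SOURCE A (Python) =====
-- def split_arguments(args, splitter_name, default=None):
--     if splitter_name not in args:
--         return args, default
--     index = args.index(splitter_name)
--     return args[0:index], args[index + 1:]
--
-- def extract_cmake_and_make_arguments(args):
--     cmake_args = []
--     make_args = []
--     if '--cmake-args' in args and '--make-args' in args:
--         cmake_index = args.index('--cmake-args')
--         make_index = args.index('--make-args')
--         # split off last argument group first
--         if cmake_index < make_index:
--             args, make_args = split_arguments(args, '--make-args')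
--             args, cmake_args = split_arguments(args, '--cmake-args')
--         else:
--             args, cmake_args = split_arguments(args, '--cmake-args')
--             args, make_args = split_arguments(args, '--make-args')
--     elif '--cmake-args' in args:
--         args, cmake_args = split_arguments(args, '--cmake-args')
--     elif '--make-args' in args:
--         args, make_args = split_arguments(args, '--make-args')
--
--     # classify -D* and -G* arguments as cmake specific arguments
--     implicit_cmake_args = [a for a in args if a.startswith('-D') or a.startswith('-G')]
--     args = [a for a in args if a not in implicit_cmake_args]
--
--     return args, implicit_cmake_args + cmake_args, make_args
-- ===== SOURCE B (Python) =====
-- def extract_cmake_and_make_arguments(args):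
--     main = []
--     implicit_cmake_args = []
--     cmake_args = []
--     make_args = []
--     target = 'main'
--     seen_cmake = False
--     seen_make = False
--     for a in args:
--         if a == '--cmake-args' and not seen_cmake:
--             seen_cmake = True
--             target = 'cmake'
--         elif a == '--make-args' and not seen_make:
--             seen_make = True
--             target = 'make'
--         elif target == 'cmake':
--             cmake_args.append(a)
--         elif target == 'make':
--             make_args.append(a)
--         elif a.startswith('-D') or a.startswith('-G'):
--             implicit_cmake_args.append(a)
--         else:
--             main.append(a)
--     return main, implicit_cmake_args + cmake_args, make_args
-- ===== Notes on version B (the rewrite author's own statement) =====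
-- stated objective: alternative
-- what changed: Replaces A's repeated membership tests, index scans and slicing (plus a post-hoc filter pass for -D/-G tokens) with a single left-to-right pass that routes each token into the current group, switching groups on the first occurrence of each splitter.
import Mathlib
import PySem

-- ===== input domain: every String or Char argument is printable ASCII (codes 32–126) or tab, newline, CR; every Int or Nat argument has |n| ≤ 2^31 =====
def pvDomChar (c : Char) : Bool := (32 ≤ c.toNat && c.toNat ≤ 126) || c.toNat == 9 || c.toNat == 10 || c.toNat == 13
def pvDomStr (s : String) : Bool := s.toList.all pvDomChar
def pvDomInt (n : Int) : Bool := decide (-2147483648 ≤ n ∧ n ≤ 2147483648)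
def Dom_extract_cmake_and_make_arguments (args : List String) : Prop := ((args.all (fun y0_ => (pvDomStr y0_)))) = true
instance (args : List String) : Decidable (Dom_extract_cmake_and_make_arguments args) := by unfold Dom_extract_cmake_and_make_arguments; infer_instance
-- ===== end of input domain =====

-- B replaces A's repeated membership tests, index scans and slicing with a single
-- left-to-right pass that routes each token into the current group (objective: alternative).

-- ===== PORT A =====
-- port of split_arguments: 'splitter_name not in args' is exactly index? = none
def split_arguments (args : List String) (splitter_name : String)
    (default : Option (List String)) : List String × Option (List String) :=
  match PySem.List.index? args splitter_name with
  | none => (args, default)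
  | some index =>
      (PySem.List.slice args (some 0) (some (index : Int)),
       some (PySem.List.slice args (some ((index : Int) + 1)) none))

def extract_cmake_and_make_arguments (args : List String) : List String × List String × List String :=
  -- the three branches of A, with '"x" in args' tested via index? (some ↔ member);
  -- the '.getD []' on split results is unreachable: each split's splitter is present by the branch guard
  let (args1, cmake_args, make_args) :=
    match PySem.List.index? args "--cmake-args", PySem.List.index? args "--make-args" with
    | some cmake_index, some make_index =>
        if cmake_index < make_index then
          let (args', make_args') := split_arguments args "--make-args" none
          let (args'', cmake_args') := split_arguments args' "--cmake-args" none
          (args'', cmake_args'.getD [], make_args'.getD [])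
        else
          let (args', cmake_args') := split_arguments args "--cmake-args" none
          let (args'', make_args') := split_arguments args' "--make-args" none
          (args'', cmake_args'.getD [], make_args'.getD [])
    | some _, none =>
        let (args', cmake_args') := split_arguments args "--cmake-args" none
        (args', cmake_args'.getD [], [])
    | none, some _ =>
        let (args', make_args') := split_arguments args "--make-args" none
        (args', [], make_args'.getD [])
    | none, none => (args, [], [])
  let implicit_cmake_args :=
    args1.filter (fun a => PySem.Str.startswith a "-D" || PySem.Str.startswith a "-G")
  let args2 := args1.filter (fun a => !(implicit_cmake_args.contains a))
  (args2, implicit_cmake_args ++ cmake_args, make_args)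

-- ===== PORT B =====
-- the single pass of Source B: state = (current target, seen_cmake, seen_make); target 0 = main, 1 = cmake, 2 = make
def pvAltLoop (l : List String) (target : Nat) (seen_cmake seen_make : Bool) :
    List String × List String × List String × List String :=
  match l with
  | [] => ([], [], [], [])
  | a :: rest =>
    if a == "--cmake-args" && !seen_cmake then
      pvAltLoop rest 1 true seen_make
    else if a == "--make-args" && !seen_make then
      pvAltLoop rest 2 seen_cmake true
    else if target == 1 then
      let (m, i, c, k) := pvAltLoop rest target seen_cmake seen_make
      (m, i, a :: c, k)
    else if target == 2 then
      let (m, i, c, k) := pvAltLoop rest target seen_cmake seen_make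
      (m, i, c, a :: k)
    else if PySem.Str.startswith a "-D" || PySem.Str.startswith a "-G" then
      let (m, i, c, k) := pvAltLoop rest target seen_cmake seen_make
      (m, a :: i, c, k)
    else
      let (m, i, c, k) := pvAltLoop rest target seen_cmake seen_make
      (a :: m, i, c, k)

def extract_cmake_and_make_arguments_alt (args : List String) : List String × List String × List String :=
  let (main, implicit_cmake_args, cmake_args, make_args) := pvAltLoop args 0 false false
  (main, implicit_cmake_args ++ cmake_args, make_args)

-- ===== PRECONDITION & SPEC =====
def Spec_extract_cmake_and_make_arguments (args : List String) (out : List String × List String × List String) : Prop := out = extract_cmake_and_make_arguments_alt args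
instance (args : List String) (out : List String × List String × List String) : Decidable (Spec_extract_cmake_and_make_arguments args out) := by unfold Spec_extract_cmake_and_make_arguments; infer_instance

-- ===== CLAIM (what is proved, stated in full; the proofs are below) =====
def Claim_equal_extract_cmake_and_make_arguments : Prop := ∀ (args : List String), Dom_extract_cmake_and_make_arguments args → Spec_extract_cmake_and_make_arguments args (extract_cmake_and_make_arguments args)

-- ===== LEMMAS AND PROOFS =====

-- the implicit-cmake test of both programs, named for the lemma statements
def pvP (a : String) : Bool := PySem.Str.startswith a "-D" || PySem.Str.startswith a "-G"

theorem pvP_eq : pvP = fun a => PySem.Str.startswith a "-D" || PySem.Str.startswith a "-G" := rfl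

-- once both splitters have been consumed, every token lands in the current group
theorem pvAltLoop_done (l : List String) (t : Nat) (ht : t = 1 ∨ t = 2) :
    pvAltLoop l t true true = ([], [], if t = 1 then l else [], if t = 2 then l else []) := by
  induction l with
  | nil => rcases ht with h | h <;> subst h <;> simp [pvAltLoop]
  | cons a rest ih =>
    rcases ht with h | h <;> subst h <;> simp [pvAltLoop, ih] <;> split_ifs <;> simp_all

-- cmake phase, make splitter still pending
theorem pvAltLoop_cmake (l : List String) :
    pvAltLoop l 1 true false =
      match PySem.List.index? l "--make-args" with
      | none => ([], [], l, [])
      | some i => ([], [], l.take i, l.drop (i + 1)) := by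
  induction l with
  | nil => simp [pvAltLoop, PySem.List.index?_eq_idxOf?, List.idxOf?]
  | cons a rest ih =>
    by_cases ha : a = "--make-args"
    · subst ha
      rw [pvAltLoop, PySem.List.index?_cons_self]
      simp [pvAltLoop_done rest 2 (Or.inr rfl)]
    · rw [pvAltLoop, PySem.List.index?_cons_of_ne rest ha]
      cases h : PySem.List.index? rest "--make-args" with
      | none => simp only [ih, h]; simp [ha]
      | some i => simp only [ih, h]; simp [ha]

-- make phase, cmake splitter still pending
theorem pvAltLoop_make (l : List String) :
    pvAltLoop l 2 false true =
      match PySem.List.index? l "--cmake-args" with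
      | none => ([], [], [], l)
      | some i => ([], [], l.drop (i + 1), l.take i) := by
  induction l with
  | nil => simp [pvAltLoop, PySem.List.index?_eq_idxOf?, List.idxOf?]
  | cons a rest ih =>
    by_cases ha : a = "--cmake-args"
    · subst ha
      rw [pvAltLoop, PySem.List.index?_cons_self]
      simp [pvAltLoop_done rest 1 (Or.inl rfl)]
    · rw [pvAltLoop, PySem.List.index?_cons_of_ne rest ha]
      cases h : PySem.List.index? rest "--cmake-args" with
      | none => simp only [ih, h]; simp [ha]
      | some i => simp only [ih, h]; simp [ha]

-- full characterisation of B's pass by the first occurrence of each splitter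
theorem pvAltLoop_main (l : List String) :
    pvAltLoop l 0 false false =
      match PySem.List.index? l "--cmake-args", PySem.List.index? l "--make-args" with
      | none, none => (l.filter (fun a => !pvP a), l.filter pvP, [], [])
      | some c, none =>
          ((l.take c).filter (fun a => !pvP a), (l.take c).filter pvP, l.drop (c + 1), [])
      | none, some m =>
          ((l.take m).filter (fun a => !pvP a), (l.take m).filter pvP, [], l.drop (m + 1))
      | some c, some m =>
          if c < m then
            ((l.take c).filter (fun a => !pvP a), (l.take c).filter pvP,
             (l.drop (c + 1)).take (m - (c + 1)), l.drop (m + 1))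
          else
            ((l.take m).filter (fun a => !pvP a), (l.take m).filter pvP,
             l.drop (c + 1), (l.drop (m + 1)).take (c - (m + 1))) := by
  induction l with
  | nil => simp [pvAltLoop, PySem.List.index?_eq_idxOf?, List.idxOf?]
  | cons a rest ih =>
    by_cases hc : a = "--cmake-args"
    · subst hc
      rw [pvAltLoop, PySem.List.index?_cons_self,
        PySem.List.index?_cons_of_ne rest (show "--cmake-args" ≠ "--make-args" by decide)]
      simp only [pvAltLoop_cmake]
      cases h : PySem.List.index? rest "--make-args" with
      | none => simp [h]
      | some i => simp [h]
    · by_cases hm : a = "--make-args"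
      · subst hm
        rw [pvAltLoop, PySem.List.index?_cons_self,
          PySem.List.index?_cons_of_ne rest (show "--make-args" ≠ "--cmake-args" by decide)]
        simp only [pvAltLoop_make]
        cases h : PySem.List.index? rest "--cmake-args" with
        | none => simp [h]
        | some i => simp [h]
      · rw [pvAltLoop, PySem.List.index?_cons_of_ne rest hc, PySem.List.index?_cons_of_ne rest hm]
        cases h1 : PySem.List.index? rest "--cmake-args" with
        | none =>
          cases h2 : PySem.List.index? rest "--make-args" with
          | none =>
            rw [ih, h1, h2]
            by_cases hD : PySem.Chars.startswith a.toList ['-', 'D'] = true <;>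
              by_cases hG : PySem.Chars.startswith a.toList ['-', 'G'] = true <;>
                simp [hc, hm, List.filter_cons, pvP, hD, hG]
          | some m =>
            rw [ih, h1, h2]
            by_cases hD : PySem.Chars.startswith a.toList ['-', 'D'] = true <;>
              by_cases hG : PySem.Chars.startswith a.toList ['-', 'G'] = true <;>
                simp [hc, hm, List.filter_cons, pvP, hD, hG]
        | some c =>
          cases h2 : PySem.List.index? rest "--make-args" with
          | none =>
            rw [ih, h1, h2]
            by_cases hD : PySem.Chars.startswith a.toList ['-', 'D'] = true <;>
              by_cases hG : PySem.Chars.startswith a.toList ['-', 'G'] = true <;>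
                simp [hc, hm, List.filter_cons, pvP, hD, hG]
          | some m =>
            rw [ih, h1, h2]
            by_cases hcm : c < m <;> by_cases hD : PySem.Chars.startswith a.toList ['-', 'D'] = true <;>
              by_cases hG : PySem.Chars.startswith a.toList ['-', 'G'] = true <;>
                simp [hc, hm, hcm, List.filter_cons, pvP, hD, hG, Nat.add_lt_add_iff_right]

-- A's final filter: removing every token that occurs in (l.filter p) keeps exactly the ¬p tokens
theorem pvFilter_not_mem (p : String → Bool) (l : List String) :
    l.filter (fun a => !((l.filter p).contains a)) = l.filter (fun a => !p a) := by
  apply List.filter_congr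
  intro x hx
  simp [List.elem_eq_contains.symm, List.elem_iff, List.mem_filter, hx]

theorem pvSplit_some (args : List String) (s : String) (d : Option (List String)) (i : Nat)
    (h : PySem.List.index? args s = some i) :
    split_arguments args s d = (args.take i, some (args.drop (i + 1))) := by
  have h1 : PySem.List.slice args (some 0) (some (i : Int)) = args.take i := by
    rw [PySem.List.slice_zero_start, PySem.List.slice_to_natCast]
  have h2 : PySem.List.slice args (some ((i : Int) + 1)) none = args.drop (i + 1) := by
    have hcast : ((i : Int) + 1) = ((i + 1 : Nat) : Int) := by push_cast; ring
    rw [hcast, PySem.List.slice_from_natCast]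
  unfold split_arguments
  simp only [h, h1, h2]

theorem pvIndex?_take {l : List String} {v : String} {c n : Nat}
    (h : PySem.List.index? l v = some c) (hcn : c < n) :
    PySem.List.index? (l.take n) v = some c := by
  rw [PySem.List.index?_eq_some_iff] at h ⊢
  obtain ⟨pre, suf, rfl, hlen, hpre⟩ := h
  obtain ⟨k, hk⟩ : ∃ k, n - pre.length = k + 1 := ⟨n - pre.length - 1, by omega⟩
  refine ⟨pre, suf.take k, ?_, hlen, hpre⟩
  rw [List.take_append, List.take_of_length_le (by omega), hk]
  simp

theorem pvPorts_eq (args : List String) :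
    extract_cmake_and_make_arguments args = extract_cmake_and_make_arguments_alt args := by
  unfold extract_cmake_and_make_arguments extract_cmake_and_make_arguments_alt
  rw [pvAltLoop_main]
  cases h1 : PySem.List.index? args "--cmake-args" with
  | none =>
    cases h2 : PySem.List.index? args "--make-args" with
    | none =>
      simp only [h1, h2, pvP_eq]
      rw [pvFilter_not_mem]
    | some m =>
      simp only [h1, h2, pvSplit_some args "--make-args" none m h2, pvP_eq]
      rw [pvFilter_not_mem]
      simp
  | some c =>
    cases h2 : PySem.List.index? args "--make-args" with
    | none =>
      simp only [h1, h2, pvSplit_some args "--cmake-args" none c h1, pvP_eq]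
      rw [pvFilter_not_mem]
      simp
    | some m =>
      have hcm : c ≠ m := by
        intro hEq
        obtain ⟨hk1, hv1, -⟩ := PySem.List.getElem_of_index?_eq_some h1
        obtain ⟨hk2, hv2, -⟩ := PySem.List.getElem_of_index?_eq_some h2
        subst hEq
        rw [hv1] at hv2
        exact absurd hv2 (by decide)
      by_cases hlt : c < m
      · have hs2 := pvSplit_some args "--make-args" none m h2
        have hi1 : PySem.List.index? (args.take m) "--cmake-args" = some c :=
          pvIndex?_take h1 hlt
        have hs1 := pvSplit_some (args.take m) "--cmake-args" none c hi1
        simp only [h1, h2, hs2, hs1, hlt, if_true, pvP_eq]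
        rw [pvFilter_not_mem]
        simp [List.take_take, Nat.min_eq_left (Nat.le_of_lt hlt), List.drop_take]
      · have hmc : m < c := by omega
        have hs1 := pvSplit_some args "--cmake-args" none c h1
        have hi2 : PySem.List.index? (args.take c) "--make-args" = some m :=
          pvIndex?_take h2 hmc
        have hs2 := pvSplit_some (args.take c) "--make-args" none m hi2
        simp only [h1, h2, hs1, hs2, hlt, if_false, pvP_eq]
        rw [pvFilter_not_mem]
        simp [List.take_take, Nat.min_eq_left (Nat.le_of_lt hmc), List.drop_take]

-- ===== VERDICT (by name: the statement is the Claim_ definition above) =====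
theorem extract_cmake_and_make_arguments_spec : Claim_equal_extract_cmake_and_make_arguments := by
  intro args _
  unfold Spec_extract_cmake_and_make_arguments
  exact pvPorts_eq args
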